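-- pv_equiv track=rewrite | github.com/MateoSansleH/PythonYoutubeDL | librairie/biblio.py | ouiounon
-- ===== SOURCE A (Python) =====
-- def ouiounon(var):
--     liste_oui = ["OUI", "Oui", "oui", "O", "o", "YES", "Yes", "yes", "Y", "y", "1"]
--     liste_non = ["NON", "Non", "non", "N", "n", "NO", "No", "no", "0"]
--     flag_oui = 0
--     flag_non = 0
--
--     for i in liste_oui:
--         if i == var:
--             flag_oui = 1
--
--     for i in liste_non:
--         if i == var:
--             flag_non = 1
--
--     if flag_oui == 1 and flag_non == 0:
--         rslt = 1
--     elif flag_oui == 0 and flag_non == 1: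
--         rslt = 0
--     else :
--         rslt = 2
--
--     return rslt
-- ===== SOURCE B (Python) =====
-- def ouiounon(var):
--     # canonical lowercase words; accepted spellings are derived (lower/UPPER/Capitalized)
--     answers = {"oui": 1, "yes": 1, "y": 1, "o": 1, "1": 1,
--                "non": 0, "no": 0, "n": 0, "0": 0}
--     for w, v in answers.items():
--         if var in (w, w.upper(), w.capitalize()):
--             return v
--     return 2
-- ===== Notes on version B (the rewrite author's own statement) =====
-- stated objective: simpler
-- what changed: Instead of enumerating all 20 spellings in two flag-setting scans with a three-way branch, B keeps only 9 canonical lowercase words mapped to their answers and derives the accepted spellings (word, word.upper(), word.capitalize()) on the fly in a single first-match pass with an early return.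
import Mathlib
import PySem

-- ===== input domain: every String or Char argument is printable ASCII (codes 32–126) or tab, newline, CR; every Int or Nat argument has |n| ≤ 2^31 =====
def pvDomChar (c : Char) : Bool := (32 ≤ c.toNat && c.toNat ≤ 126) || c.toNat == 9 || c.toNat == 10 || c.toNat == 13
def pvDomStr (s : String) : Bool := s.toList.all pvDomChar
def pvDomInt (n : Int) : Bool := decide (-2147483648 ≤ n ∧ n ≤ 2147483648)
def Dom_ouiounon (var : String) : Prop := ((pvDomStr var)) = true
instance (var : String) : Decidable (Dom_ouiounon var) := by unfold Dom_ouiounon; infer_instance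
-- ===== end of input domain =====

-- B keeps 9 canonical lowercase words with their answers and derives the accepted
-- spellings (lower/UPPER/Capitalized) on the fly in one first-match pass: simpler.

-- ===== PORT A =====
def ouiounon (var : String) : Int :=
  let liste_oui : List String := ["OUI", "Oui", "oui", "O", "o", "YES", "Yes", "yes", "Y", "y", "1"]
  let liste_non : List String := ["NON", "Non", "non", "N", "n", "NO", "No", "no", "0"]
  let flag_oui : Int := liste_oui.foldl (fun f i => if i == var then 1 else f) 0
  let flag_non : Int := liste_non.foldl (fun f i => if i == var then 1 else f) 0
  if flag_oui == 1 && flag_non == 0 then 1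
  else if flag_oui == 0 && flag_non == 1 then 0
  else 2

-- ===== PORT B =====
-- str.capitalize: first char uppercased, the rest lowercased (exact on ASCII strings)
def pyCapitalize (s : String) : String :=
  match s.toList with
  | [] => ""
  | c :: rest => String.ofList (PySem.Chars.upperChar c :: PySem.Chars.lower rest)

-- Source B's dict has distinct keys, so iterating .items() in insertion order is this list;
-- the for-loop with early return is the first match (find?), default 2 when none matches.
def ouiounon_alt (var : String) : Int :=
  let answers : List (String × Int) :=
    [("oui", 1), ("yes", 1), ("y", 1), ("o", 1), ("1", 1),
     ("non", 0), ("no", 0), ("n", 0), ("0", 0)]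
  match answers.find? (fun wv =>
      var == wv.1 || var == PySem.Str.upper wv.1 || var == pyCapitalize wv.1) with
  | some wv => wv.2
  | none => 2

-- ===== PRECONDITION & SPEC =====
def Spec_ouiounon (var : String) (out : Int) : Prop := out = ouiounon_alt var
instance (var : String) (out : Int) : Decidable (Spec_ouiounon var out) := by unfold Spec_ouiounon; infer_instance

-- ===== CLAIM (what is proved, stated in full; the proofs are below) =====
def Claim_equal_ouiounon : Prop := ∀ (var : String), Dom_ouiounon var → Spec_ouiounon var (ouiounon var)

-- ===== LEMMAS AND PROOFS =====
theorem ouiounon_eq_alt (var : String) : ouiounon var = ouiounon_alt var := by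
  by_cases h0 : var = "OUI"
  · subst h0; decide
  by_cases h1 : var = "Oui"
  · subst h1; decide
  by_cases h2 : var = "oui"
  · subst h2; decide
  by_cases h3 : var = "O"
  · subst h3; decide
  by_cases h4 : var = "o"
  · subst h4; decide
  by_cases h5 : var = "YES"
  · subst h5; decide
  by_cases h6 : var = "Yes"
  · subst h6; decide
  by_cases h7 : var = "yes"
  · subst h7; decide
  by_cases h8 : var = "Y"
  · subst h8; decide
  by_cases h9 : var = "y"
  · subst h9; decide
  by_cases h10 : var = "1"
  · subst h10; decide
  by_cases h11 : var = "NON"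
  · subst h11; decide
  by_cases h12 : var = "Non"
  · subst h12; decide
  by_cases h13 : var = "non"
  · subst h13; decide
  by_cases h14 : var = "N"
  · subst h14; decide
  by_cases h15 : var = "n"
  · subst h15; decide
  by_cases h16 : var = "NO"
  · subst h16; decide
  by_cases h17 : var = "No"
  · subst h17; decide
  by_cases h18 : var = "no"
  · subst h18; decide
  by_cases h19 : var = "0"
  · subst h19; decide
  -- var matches no spelling: A's flags both stay 0, B's first-match search fails
  have u1 : PySem.Str.upper "oui" = "OUI" := by decide
  have u2 : PySem.Str.upper "yes" = "YES" := by decide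
  have u3 : PySem.Str.upper "y" = "Y" := by decide
  have u4 : PySem.Str.upper "o" = "O" := by decide
  have u5 : PySem.Str.upper "1" = "1" := by decide
  have u6 : PySem.Str.upper "non" = "NON" := by decide
  have u7 : PySem.Str.upper "no" = "NO" := by decide
  have u8 : PySem.Str.upper "n" = "N" := by decide
  have u9 : PySem.Str.upper "0" = "0" := by decide
  have c1 : pyCapitalize "oui" = "Oui" := by decide
  have c2 : pyCapitalize "yes" = "Yes" := by decide
  have c3 : pyCapitalize "y" = "Y" := by decide
  have c4 : pyCapitalize "o" = "O" := by decide
  have c5 : pyCapitalize "1" = "1" := by decide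
  have c6 : pyCapitalize "non" = "Non" := by decide
  have c7 : pyCapitalize "no" = "No" := by decide
  have c8 : pyCapitalize "n" = "N" := by decide
  have c9 : pyCapitalize "0" = "0" := by decide
  have g0 : ¬ ("OUI" = var) := fun e => h0 e.symm
  have g1 : ¬ ("Oui" = var) := fun e => h1 e.symm
  have g2 : ¬ ("oui" = var) := fun e => h2 e.symm
  have g3 : ¬ ("O" = var) := fun e => h3 e.symm
  have g4 : ¬ ("o" = var) := fun e => h4 e.symm
  have g5 : ¬ ("YES" = var) := fun e => h5 e.symm
  have g6 : ¬ ("Yes" = var) := fun e => h6 e.symm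
  have g7 : ¬ ("yes" = var) := fun e => h7 e.symm
  have g8 : ¬ ("Y" = var) := fun e => h8 e.symm
  have g9 : ¬ ("y" = var) := fun e => h9 e.symm
  have g10 : ¬ ("1" = var) := fun e => h10 e.symm
  have g11 : ¬ ("NON" = var) := fun e => h11 e.symm
  have g12 : ¬ ("Non" = var) := fun e => h12 e.symm
  have g13 : ¬ ("non" = var) := fun e => h13 e.symm
  have g14 : ¬ ("N" = var) := fun e => h14 e.symm
  have g15 : ¬ ("n" = var) := fun e => h15 e.symm
  have g16 : ¬ ("NO" = var) := fun e => h16 e.symm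
  have g17 : ¬ ("No" = var) := fun e => h17 e.symm
  have g18 : ¬ ("no" = var) := fun e => h18 e.symm
  have g19 : ¬ ("0" = var) := fun e => h19 e.symm
  have b0 : (var == "OUI") = false := by simp [h0]
  have b1 : (var == "Oui") = false := by simp [h1]
  have b2 : (var == "oui") = false := by simp [h2]
  have b3 : (var == "O") = false := by simp [h3]
  have b4 : (var == "o") = false := by simp [h4]
  have b5 : (var == "YES") = false := by simp [h5]
  have b6 : (var == "Yes") = false := by simp [h6]
  have b7 : (var == "yes") = false := by simp [h7]
  have b8 : (var == "Y") = false := by simp [h8]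
  have b9 : (var == "y") = false := by simp [h9]
  have b10 : (var == "1") = false := by simp [h10]
  have b11 : (var == "NON") = false := by simp [h11]
  have b12 : (var == "Non") = false := by simp [h12]
  have b13 : (var == "non") = false := by simp [h13]
  have b14 : (var == "N") = false := by simp [h14]
  have b15 : (var == "n") = false := by simp [h15]
  have b16 : (var == "NO") = false := by simp [h16]
  have b17 : (var == "No") = false := by simp [h17]
  have b18 : (var == "no") = false := by simp [h18]
  have b19 : (var == "0") = false := by simp [h19]
  simp [ouiounon, ouiounon_alt, List.find?, u1, u2, u3, u4, u5, u6, u7, u8, u9,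
        c1, c2, c3, c4, c5, c6, c7, c8, c9,
        g0, g1, g2, g3, g4, g5, g6, g7, g8, g9,
        g10, g11, g12, g13, g14, g15, g16, g17, g18, g19,
        b0, b1, b2, b3, b4, b5, b6, b7, b8, b9,
        b10, b11, b12, b13, b14, b15, b16, b17, b18, b19]

-- ===== VERDICT (by name: the statement is the Claim_ definition above) =====
theorem ouiounon_spec : Claim_equal_ouiounon := by
  intro var _
  exact ouiounon_eq_alt var
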